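-- pv_equiv track=rewrite | github.com/lachimex/WDI | do_kolokwium5.py | cztero_zgodne
-- ===== SOURCE A (Python) =====
-- def zamiana_4(n):
--     liczba = 0
--     i = 0
--     while n > 0:
--         liczba += (n % 4) * 10**i
--         i += 1
--         n //= 4
--     return liczba
--
-- def cztero_zgodne(a, b):
--     a_4 = zamiana_4(a)
--     b_4 = zamiana_4(b)
--     t1 = [False] * 4
--     t2 = [False] * 4
--     while a_4 != 0:
--         t1[a_4 % 10] = True
--         a_4 //= 10
--     while b_4 != 0:
--         t2[b_4 % 10] = True
--         b_4 //= 10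
--     return t1 == t2
-- ===== SOURCE B (Python) =====
-- def cztero_zgodne(a, b):
--     def digits4(n):
--         s = set()
--         while n > 0:
--             s.add(n % 4)
--             n //= 4
--         return s
--     return digits4(a) == digits4(b)
-- ===== Notes on version B (the rewrite author's own statement) =====
-- stated objective: simpler
-- what changed: B drops A's pack-base-4-digits-into-a-decimal-number intermediate and its fixed 4-slot boolean tables: it collects each number's base-4 digits into a set in one loop per argument and compares the two sets.
import Mathlib
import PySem

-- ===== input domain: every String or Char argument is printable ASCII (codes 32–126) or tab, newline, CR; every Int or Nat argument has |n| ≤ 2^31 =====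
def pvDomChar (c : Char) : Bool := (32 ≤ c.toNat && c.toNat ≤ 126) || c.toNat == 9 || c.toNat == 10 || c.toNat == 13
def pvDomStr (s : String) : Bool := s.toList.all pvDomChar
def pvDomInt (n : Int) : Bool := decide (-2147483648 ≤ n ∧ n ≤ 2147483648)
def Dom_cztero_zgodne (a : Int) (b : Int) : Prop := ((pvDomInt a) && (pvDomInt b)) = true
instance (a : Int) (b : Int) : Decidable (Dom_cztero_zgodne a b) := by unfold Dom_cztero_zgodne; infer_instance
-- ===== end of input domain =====

-- B replaces A's two-phase pack-into-decimal-then-table scheme by one direct base-4 digit-set per number (objective: simpler).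


-- ===== PORT A =====
-- Every value the two while-loops touch is nonnegative (guard n > 0; zamiana_4's result is ≥ 0),
-- so the loops are ported over Nat, where Python's % and // coincide with Nat's % and /;
-- a negative argument gives toNat = 0 and the loop body never runs, exactly as with the guard n > 0.
def zamiana4Go (n liczba i : Nat) : Nat :=
  if 0 < n then zamiana4Go (n / 4) (liczba + (n % 4) * 10 ^ i) (i + 1) else liczba
termination_by n
decreasing_by exact Nat.div_lt_self (by omega) (by omega)

def unpackGo (x : Nat) (t : List Bool) : List Bool :=
  if x ≠ 0 then unpackGo (x / 10) (t.set (x % 10) true) else t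
termination_by x
decreasing_by exact Nat.div_lt_self (by omega) (by omega)

def cztero_zgodne (a : Int) (b : Int) : Bool :=
  let a4 := zamiana4Go a.toNat 0 0
  let b4 := zamiana4Go b.toNat 0 0
  let t1 := List.replicate 4 false
  let t2 := List.replicate 4 false
  unpackGo a4 t1 == unpackGo b4 t2

-- ===== PORT B =====
-- digits4 from Source B: one loop collecting n % 4 into a set; same Nat convention as above.
def digits4Go (n : Nat) (s : PySem.Set Int) : PySem.Set Int :=
  if 0 < n then digits4Go (n / 4) (PySem.Set.add s (Int.ofNat (n % 4))) else s
termination_by n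
decreasing_by exact Nat.div_lt_self (by omega) (by omega)

def cztero_zgodne_alt (a : Int) (b : Int) : Bool :=
  PySem.Set.equal (digits4Go a.toNat PySem.Set.empty) (digits4Go b.toNat PySem.Set.empty)

-- ===== PRECONDITION & SPEC =====
def Spec_cztero_zgodne (a : Int) (b : Int) (out : Bool) : Prop := out = cztero_zgodne_alt a b
instance (a : Int) (b : Int) (out : Bool) : Decidable (Spec_cztero_zgodne a b out) := by unfold Spec_cztero_zgodne; infer_instance

-- ===== CLAIM (what is proved, stated in full; the proofs are below) =====
def Claim_equal_cztero_zgodne : Prop := ∀ (a : Int) (b : Int), Dom_cztero_zgodne a b → Spec_cztero_zgodne a b (cztero_zgodne a b)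

-- ===== LEMMAS AND PROOFS =====

-- ghost: the base-4 digits of n, least significant first
def digs (n : Nat) : List Nat :=
  if 0 < n then n % 4 :: digs (n / 4) else []
termination_by n
decreasing_by exact Nat.div_lt_self (by omega) (by omega)

-- ghost: digits packed into a decimal number
def packedN : List Nat → Nat
  | [] => 0
  | d :: ds => d + 10 * packedN ds

theorem digs_lt (n : Nat) : ∀ d ∈ digs n, d < 4 := by
  induction n using Nat.strong_induction_on with
  | _ n ih =>
    rw [digs]
    split
    · rename_i h
      intro d hd
      rcases List.mem_cons.mp hd with h1 | h1
      · omega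
      · exact ih (n / 4) (Nat.div_lt_self h (by omega)) d h1
    · simp

theorem packedN_digs_pos (n : Nat) (h : 0 < n) : 0 < packedN (digs n) := by
  induction n using Nat.strong_induction_on with
  | _ n ih =>
    rw [digs, if_pos h, packedN]
    by_cases h4 : 0 < n / 4
    · have := ih (n / 4) (Nat.div_lt_self h (by omega)) h4
      omega
    · have : n % 4 = n := Nat.mod_eq_of_lt (by omega)
      omega

theorem zamiana4Go_eq (n : Nat) : ∀ l i, zamiana4Go n l i = l + 10 ^ i * packedN (digs n) := by
  induction n using Nat.strong_induction_on with
  | _ n ih =>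
    intro l i
    rw [zamiana4Go, digs]
    split
    · rename_i h
      rw [ih (n / 4) (Nat.div_lt_self h (by omega)), packedN]
      ring
    · simp [packedN]

theorem unpackGo_packed (n : Nat) : ∀ t, unpackGo (packedN (digs n)) t =
    (digs n).foldl (fun t d => t.set d true) t := by
  induction n using Nat.strong_induction_on with
  | _ n ih =>
    intro t
    by_cases h : 0 < n
    · have hm := Nat.div_lt_self h (show 1 < 4 by omega)
      rw [digs, if_pos h, packedN]
      have hd : n % 4 < 10 := by omega
      have hpos : n % 4 + 10 * packedN (digs (n / 4)) ≠ 0 := by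
        by_cases h4 : 0 < n / 4
        · have := packedN_digs_pos (n / 4) h4; omega
        · have : n % 4 = n := Nat.mod_eq_of_lt (by omega)
          omega
      rw [unpackGo, if_pos hpos]
      have hmod : (n % 4 + 10 * packedN (digs (n / 4))) % 10 = n % 4 := by omega
      have hdiv : (n % 4 + 10 * packedN (digs (n / 4))) / 10 = packedN (digs (n / 4)) := by omega
      rw [hmod, hdiv, ih (n / 4) hm]
      simp [List.foldl]
    · rw [digs, if_neg h]
      simp [packedN, unpackGo]

-- value of the boolean table built by the foldl, read with getD
theorem foldTab_getD (ds : List Nat) : ∀ (t : List Bool) (j : Nat), j < t.length →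
    (∀ d ∈ ds, d < t.length) →
    (ds.foldl (fun t d => t.set d true) t).getD j false = (t.getD j false || decide (j ∈ ds)) := by
  induction ds with
  | nil => intro t j hj _; simp
  | cons d ds ih =>
    intro t j hj hlt
    have hd : d < t.length := hlt d (by simp)
    rw [List.foldl_cons, ih (t.set d true) j (by simpa using hj)
        (by intro x hx; simpa using hlt x (List.mem_cons_of_mem _ hx))]
    by_cases hjd : j = d
    · subst hjd
      simp [List.getD, hd]
    · simp [List.getD, Ne.symm hjd, hjd]

theorem foldTab_length (ds : List Nat) : ∀ (t : List Bool),
    (ds.foldl (fun t d => t.set d true) t).length = t.length := by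
  induction ds with
  | nil => intro t; rfl
  | cons d ds ih => intro t; rw [List.foldl_cons, ih]; simp

theorem digits4Go_eq (n : Nat) : ∀ s, digits4Go n s =
    (digs n).foldl (fun s d => PySem.Set.add s (Int.ofNat d)) s := by
  induction n using Nat.strong_induction_on with
  | _ n ih =>
    intro s
    rw [digits4Go, digs]
    split
    · rename_i h
      rw [ih (n / 4) (Nat.div_lt_self h (by omega))]
      simp [List.foldl]
    · simp

theorem mem_foldl_add (ds : List Nat) : ∀ (s : PySem.Set Int) (x : Int),
    x ∈ ds.foldl (fun s d => PySem.Set.add s (Int.ofNat d)) s ↔ x ∈ s ∨ ∃ d ∈ ds, Int.ofNat d = x := by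
  induction ds with
  | nil => simp
  | cons d ds ih =>
    intro s x
    rw [List.foldl_cons, ih]
    simp [PySem.Set.mem_add]
    tauto

-- A's table for one number n, read pointwise, is membership in digs n
theorem table_getD (n : Nat) (j : Nat) (hj : j < 4) :
    (unpackGo (zamiana4Go n 0 0) (List.replicate 4 false)).getD j false = decide (j ∈ digs n) := by
  rw [zamiana4Go_eq]
  simp only [pow_zero, one_mul, Nat.zero_add]
  rw [unpackGo_packed]
  rw [foldTab_getD (digs n) (List.replicate 4 false) j (by simpa using hj)
      (by intro d hd; simpa using digs_lt n d hd)]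
  have : (List.replicate 4 false).getD j false = false := by
    interval_cases j <;> rfl
  rw [this]
  simp

theorem table_length (n : Nat) :
    (unpackGo (zamiana4Go n 0 0) (List.replicate 4 false)).length = 4 := by
  rw [zamiana4Go_eq]
  simp only [pow_zero, one_mul, Nat.zero_add]
  rw [unpackGo_packed, foldTab_length]
  simp

theorem mem_digits4 (n : Nat) (x : Int) :
    x ∈ digits4Go n PySem.Set.empty ↔ ∃ d ∈ digs n, Int.ofNat d = x := by
  rw [digits4Go_eq, mem_foldl_add]
  simp [PySem.Set.empty]

theorem tables_eq_iff (a' b' : Nat) :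
    (unpackGo (zamiana4Go a' 0 0) (List.replicate 4 false) =
     unpackGo (zamiana4Go b' 0 0) (List.replicate 4 false)) ↔
    ∀ j < 4, (j ∈ digs a' ↔ j ∈ digs b') := by
  constructor
  · intro he j hj
    have h := congrArg (fun t => t.getD j false) he
    simp only [table_getD a' j hj, table_getD b' j hj] at h
    simpa using h
  · intro h
    apply List.ext_getElem (by rw [table_length, table_length])
    intro j h1 h2
    have hj : j < 4 := by rwa [table_length] at h1
    have e1 := table_getD a' j hj
    have e2 := table_getD b' j hj
    rw [List.getD_eq_getElem _ _ h1] at e1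
    rw [List.getD_eq_getElem _ _ h2] at e2
    rw [e1, e2]
    simp [h j hj]

theorem sets_eq_iff (a' b' : Nat) :
    (PySem.Set.equal (digits4Go a' PySem.Set.empty) (digits4Go b' PySem.Set.empty) = true) ↔
    ∀ j < 4, (j ∈ digs a' ↔ j ∈ digs b') := by
  rw [PySem.Set.equal_iff]
  constructor
  · intro he j hj
    constructor
    · intro hm
      obtain ⟨d, hd, hdx⟩ := (mem_digits4 b' _).mp ((he (Int.ofNat j)).mp ((mem_digits4 a' _).mpr ⟨j, hm, rfl⟩))
      have : d = j := Int.ofNat.inj hdx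
      exact this ▸ hd
    · intro hm
      obtain ⟨d, hd, hdx⟩ := (mem_digits4 a' _).mp ((he (Int.ofNat j)).mpr ((mem_digits4 b' _).mpr ⟨j, hm, rfl⟩))
      have : d = j := Int.ofNat.inj hdx
      exact this ▸ hd
  · intro h x
    rw [mem_digits4, mem_digits4]
    constructor
    · rintro ⟨d, hd, rfl⟩
      exact ⟨d, (h d (digs_lt _ d hd)).mp hd, rfl⟩
    · rintro ⟨d, hd, rfl⟩
      exact ⟨d, (h d (digs_lt _ d hd)).mpr hd, rfl⟩

theorem key (a b : Int) : cztero_zgodne a b = cztero_zgodne_alt a b := by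
  have hA : (cztero_zgodne a b = true) ↔ ∀ j < 4, (j ∈ digs a.toNat ↔ j ∈ digs b.toNat) := by
    show ((unpackGo (zamiana4Go a.toNat 0 0) (List.replicate 4 false) ==
           unpackGo (zamiana4Go b.toNat 0 0) (List.replicate 4 false)) = true) ↔ _
    rw [beq_iff_eq]
    exact tables_eq_iff a.toNat b.toNat
  have hB : (cztero_zgodne_alt a b = true) ↔ ∀ j < 4, (j ∈ digs a.toNat ↔ j ∈ digs b.toNat) := by
    show (PySem.Set.equal (digits4Go a.toNat PySem.Set.empty) (digits4Go b.toNat PySem.Set.empty) = true) ↔ _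
    exact sets_eq_iff a.toNat b.toNat
  have := hA.trans hB.symm
  cases h1 : cztero_zgodne a b <;> cases h2 : cztero_zgodne_alt a b <;> simp_all

-- ===== VERDICT (by name: the statement is the Claim_ definition above) =====
theorem cztero_zgodne_spec : Claim_equal_cztero_zgodne := by
  intro a b _
  unfold Spec_cztero_zgodne
  exact key a b
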